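-- pv_equiv track=rewrite | github.com/deverac/piece-packager | piece-packager.py | add_prefix_to_classnames
-- ===== SOURCE A (Python) =====
-- def add_prefix_to_classnames(pfx, name_str):
--     ary = []
--     parts = name_str.split('.')
--     for part in parts:
--         if len(part):
--             ary.append(pfx+part)
--         else:
--             ary.append(part)
--     return '.'.join(ary)
-- ===== SOURCE B (Python) =====
-- def add_prefix_to_classnames(pfx, name_str):
--     out = []
--     start = True
--     for ch in name_str:
--         if ch == '.':
--             out.append(ch)
--             start = True
--         else:
--             if start:
--                 out.append(pfx)
--                 start = False
--             out.append(ch)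
--     return ''.join(out)
-- ===== Notes on version B (the rewrite author's own statement) =====
-- stated objective: alternative
-- what changed: Replaced split-on-dot / per-part loop / join with a single character-level scan that emits pfx at the start of each maximal non-dot run.
import Mathlib
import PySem

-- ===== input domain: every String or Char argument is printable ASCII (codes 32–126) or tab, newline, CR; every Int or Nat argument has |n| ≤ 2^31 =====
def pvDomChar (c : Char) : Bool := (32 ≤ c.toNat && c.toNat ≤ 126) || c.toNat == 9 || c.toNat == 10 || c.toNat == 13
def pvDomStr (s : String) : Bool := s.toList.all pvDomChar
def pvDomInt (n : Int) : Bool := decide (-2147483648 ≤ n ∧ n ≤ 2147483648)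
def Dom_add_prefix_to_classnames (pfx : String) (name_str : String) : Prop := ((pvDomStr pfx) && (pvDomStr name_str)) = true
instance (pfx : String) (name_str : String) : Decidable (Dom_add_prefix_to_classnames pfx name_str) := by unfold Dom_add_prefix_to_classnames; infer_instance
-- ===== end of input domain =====

-- B replaces A's split/loop/join with a single character-level scan (alternative decomposition, same cost).

-- ===== PORT A =====
-- A: split on '.', prefix each non-empty part, join with '.'.
def add_prefix_to_classnames (pfx : String) (name_str : String) : String :=
  match PySem.Str.split? name_str "." with
  | none => ""  -- unreachable: the separator "." is non-empty
  | some parts =>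
    let ary := parts.foldl (fun ary part =>
      if PySem.Str.len part ≠ 0 then ary ++ [pfx ++ part] else ary ++ [part]) ([] : List String)
    PySem.Str.join "." ary

-- ===== PORT B =====
-- B: one pass over the characters, emitting pfx at the start of each maximal non-dot run.
def add_prefix_to_classnames_alt (pfx : String) (name_str : String) : String :=
  let st := name_str.toList.foldl (fun (st : List Char × Bool) ch =>
    if ch = '.' then (st.1 ++ [ch], true)
    else ((if st.2 then st.1 ++ pfx.toList else st.1) ++ [ch], false)) ([], true)
  String.ofList st.1

-- ===== PRECONDITION & SPEC =====
def Spec_add_prefix_to_classnames (pfx : String) (name_str : String) (out : String) : Prop := out = add_prefix_to_classnames_alt pfx name_str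
instance (pfx : String) (name_str : String) (out : String) : Decidable (Spec_add_prefix_to_classnames pfx name_str out) := by unfold Spec_add_prefix_to_classnames; infer_instance

-- ===== CLAIM (what is proved, stated in full; the proofs are below) =====
def Claim_equal_add_prefix_to_classnames : Prop := ∀ (pfx : String) (name_str : String), Dom_add_prefix_to_classnames pfx name_str → Spec_add_prefix_to_classnames pfx name_str (add_prefix_to_classnames pfx name_str)

-- ===== LEMMAS AND PROOFS =====

-- Simple recursive form of splitting on a single character.
def splitAux (c : Char) : List Char → List Char → List (List Char)
  | [], cur => [cur.reverse]
  | x :: rest, cur =>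
    if x = c then cur.reverse :: splitAux c rest []
    else splitAux c rest (x :: cur)

lemma splitAux_ne_nil (c : Char) : ∀ s cur, splitAux c s cur ≠ [] := by
  intro s
  induction s with
  | nil => intro cur; simp [splitAux]
  | cons x rest ih =>
    intro cur
    by_cases hx : x = c <;> simp [splitAux, hx, ih]

lemma go_singleton (c : Char) : ∀ fuel l cur acc, l.length < fuel →
    PySem.Chars.splitOn.go [c] fuel l cur acc = acc.reverse ++ splitAux c l cur := by
  intro fuel
  induction fuel with
  | zero => intro l cur acc h; omega
  | succ n ih =>
    intro l cur acc h
    cases l with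
    | nil => simp [PySem.Chars.splitOn.go, splitAux]
    | cons x rest =>
      rw [PySem.Chars.splitOn.go]
      by_cases hx : x = c
      · subst hx
        have hpre : [x].isPrefixOf (x :: rest) = true := by simp [List.isPrefixOf]
        rw [hpre, if_pos rfl]
        simp only [List.length_cons] at h
        have hdrop : List.drop [x].length (x :: rest) = rest := by simp
        rw [hdrop, ih rest [] (cur.reverse :: acc) (by omega)]
        simp [splitAux]
      · have hpre : [c].isPrefixOf (x :: rest) = false := by
          simp [List.isPrefixOf, Ne.symm hx]
        rw [hpre]
        simp only [Bool.false_eq_true, if_false]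
        simp only [List.length_cons] at h
        rw [ih rest (x :: cur) acc (by omega)]
        simp [splitAux, hx]

lemma splitOn_singleton (c : Char) (s : List Char) :
    PySem.Chars.splitOn s [c] = splitAux c s [] := by
  have := go_singleton c (s.length + 1) s [] [] (Nat.lt_succ_self _)
  simpa [PySem.Chars.splitOn] using this

-- B's per-character scan as a recursive function.
def scan (pfx : List Char) : List Char → Bool → List Char
  | [], _ => []
  | ch :: rest, start =>
    if ch = '.' then ch :: scan pfx rest true
    else (if start then pfx else []) ++ ch :: scan pfx rest false

lemma foldl_scan (pfx : List Char) : ∀ (l : List Char) (acc : List Char) (start : Bool),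
    (l.foldl (fun (st : List Char × Bool) ch =>
      if ch = '.' then (st.1 ++ [ch], true)
      else ((if st.2 then st.1 ++ pfx else st.1) ++ [ch], false)) (acc, start)).1
    = acc ++ scan pfx l start := by
  intro l
  induction l with
  | nil => intro acc start; simp [scan]
  | cons ch rest ih =>
    intro acc start
    by_cases h : ch = '.'
    · simp [h, List.foldl_cons, ih, scan]
    · by_cases hs : start <;> simp [h, hs, List.foldl_cons, ih, scan]

-- Characterisation of A's join-of-mapped-parts as B's scan.
lemma join_map_splitAux (pfx : List Char) (s : List Char) : ∀ cur,
    PySem.Chars.join ['.'] ((splitAux '.' s cur).map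
      (fun q => if q.length ≠ 0 then pfx ++ q else q))
    = (if cur.isEmpty then scan pfx s true else pfx ++ cur.reverse ++ scan pfx s false) := by
  induction s with
  | nil =>
    intro cur
    cases cur with
    | nil => simp [splitAux, scan, PySem.Chars.join_singleton]
    | cons a cs => simp [splitAux, scan, PySem.Chars.join_singleton]
  | cons x rest ih =>
    intro cur
    by_cases hx : x = '.'
    · subst hx
      obtain ⟨b, bs, hb⟩ := List.exists_cons_of_ne_nil (splitAux_ne_nil '.' rest [])
      have hrest := ih []
      simp only [splitAux]
      rw [hb]
      rw [if_pos trivial, List.map_cons, List.map_cons, PySem.Chars.join_cons_cons]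
      rw [hb, List.map_cons] at hrest
      rw [hrest]
      cases cur with
      | nil => simp [scan]
      | cons a cs => simp [scan]
    · have h1 := ih (x :: cur)
      simp only [splitAux, if_neg hx]
      rw [h1]
      cases cur with
      | nil => simp [scan, hx]
      | cons a cs => simp [scan, hx]

lemma toList_A (pfx name_str : String) :
    (add_prefix_to_classnames pfx name_str).toList = scan pfx.toList name_str.toList true := by
  unfold add_prefix_to_classnames
  have hsplit := PySem.Str.split?_map name_str "."
  cases hps : PySem.Str.split? name_str "." with
  | none => simp [hps, PySem.Chars.split?] at hsplit
  | some parts =>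
    have hparts : parts.map String.toList = PySem.Chars.splitOn name_str.toList ['.'] := by
      rw [hps] at hsplit
      simpa [PySem.Chars.split?] using hsplit
    -- the foldl builds exactly the mapped list
    have hfold : ∀ (ps : List String) (init : List String),
        ps.foldl (fun ary part =>
          if PySem.Str.len part ≠ 0 then ary ++ [pfx ++ part] else ary ++ [part]) init
        = init ++ ps.map (fun part => if PySem.Str.len part ≠ 0 then pfx ++ part else part) := by
      intro ps
      induction ps with
      | nil => intro init; simp
      | cons p rest ihf =>
        intro init
        rw [List.foldl_cons, List.map_cons]
        by_cases hp : PySem.Str.len p ≠ 0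
        · rw [if_pos hp, if_pos hp, ihf]
          simp
        · rw [if_neg hp, if_neg hp, ihf]
          simp
    simp only [hfold, List.nil_append]
    rw [PySem.Str.toList_join]
    have hmap : (parts.map (fun part => if PySem.Str.len part ≠ 0 then pfx ++ part else part)).map String.toList
        = (parts.map String.toList).map (fun q => if q.length ≠ 0 then pfx.toList ++ q else q) := by
      simp only [List.map_map]
      apply List.map_congr_left
      intro p _
      simp only [Function.comp, PySem.Str.len_eq]
      by_cases hp : p.toList.length = 0
      · rw [if_neg (by omega), if_neg (by omega)]
      · rw [if_pos (by exact_mod_cast hp), if_pos hp, String.toList_append]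
    rw [hmap, hparts, splitOn_singleton]
    have := join_map_splitAux pfx.toList name_str.toList []
    simpa using this

lemma toList_B (pfx name_str : String) :
    (add_prefix_to_classnames_alt pfx name_str).toList = scan pfx.toList name_str.toList true := by
  unfold add_prefix_to_classnames_alt
  rw [String.toList_ofList]
  simp only [foldl_scan pfx.toList name_str.toList [] true, List.nil_append]

-- ===== VERDICT (by name: the statement is the Claim_ definition above) =====
theorem add_prefix_to_classnames_spec : Claim_equal_add_prefix_to_classnames := by
  intro pfx name_str _
  unfold Spec_add_prefix_to_classnames
  exact String.toList_injective ((toList_A pfx name_str).trans (toList_B pfx name_str).symm)
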